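-- pv_equiv track=rewrite | github.com/konszymanski/leetcode-dataset | obfuscated_solutions/python/1717-maximum-score-from-removing-substrings/solution_2_l0_l1_l2.py | v2_214
-- ===== SOURCE A (Python) =====
-- def v2_214(v3_125, v4_859, v5_381):
--     v1_754 = 0
--     v6_350 = 0
--     for v7_328 in range(0, len(v3_125)):
--         v3_125[v6_350] = v3_125[v7_328]
--         v6_350 = v6_350 + 1
--         if v6_350 > 1 and v3_125[v6_350 - 2] == v4_859[0] and (v3_125[v6_350 - 1] == v4_859[1]):
--             v6_350 = v6_350 - 2
--             v1_754 = v1_754 + v5_381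
--     del v3_125[v6_350:]
--     return v1_754
-- ===== SOURCE B (Python) =====
-- def v2_214(v3_125, v4_859, v5_381):
--     # Repeated left-to-right sweeps: each pass removes every non-overlapping
--     # adjacent (v4_859[0], v4_859[1]) pair it meets, scoring v5_381 per removal,
--     # until a pass removes nothing.  Mutates v3_125 in place like the original.
--     c0 = v4_859[0]
--     c1 = v4_859[1]
--     total = 0
--     changed = True
--     while changed:
--         changed = False
--         out = []
--         i = 0
--         n = len(v3_125)
--         while i < n:
--             if i + 1 < n and v3_125[i] == c0 and v3_125[i + 1] == c1:
--                 total += v5_381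
--                 changed = True
--                 i += 2
--             else:
--                 out.append(v3_125[i])
--                 i += 1
--         v3_125[:] = out
--     return total
-- ===== Notes on version B (the rewrite author's own statement) =====
-- stated objective: alternative
-- what changed: Replaces the one-pass in-array index-stack with repeated left-to-right sweeps that delete every non-overlapping adjacent pair per pass and loop until a fixpoint, rebuilding the list each pass.
-- outside the precondition, e.g. on v2_214(['x', 'y'], 'a', 5): A returns 0, B raises IndexError; on v2_214([], '', 3): A returns 0, B raises IndexError
import Mathlib
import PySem

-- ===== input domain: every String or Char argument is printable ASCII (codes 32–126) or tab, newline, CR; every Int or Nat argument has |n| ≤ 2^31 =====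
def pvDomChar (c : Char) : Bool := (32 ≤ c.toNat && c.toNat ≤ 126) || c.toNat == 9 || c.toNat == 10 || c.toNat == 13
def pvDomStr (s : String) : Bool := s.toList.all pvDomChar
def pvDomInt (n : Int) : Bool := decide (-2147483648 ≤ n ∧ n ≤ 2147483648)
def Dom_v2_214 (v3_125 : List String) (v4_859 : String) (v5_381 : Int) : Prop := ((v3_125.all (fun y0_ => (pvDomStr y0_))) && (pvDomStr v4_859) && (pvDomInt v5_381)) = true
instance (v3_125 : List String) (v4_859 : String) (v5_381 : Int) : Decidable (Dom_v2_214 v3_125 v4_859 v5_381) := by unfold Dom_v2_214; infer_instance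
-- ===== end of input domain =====

-- B replaces A's one-pass index-stack with repeated left-to-right sweep passes that each
-- remove all non-overlapping adjacent pattern pairs until a fixpoint (an alternative,
-- not faster, strategy).  Both Pythons mutate v3_125 in place identically; the equivalence
-- proved here is about the RETURN value only.


-- ===== PORT A =====
-- one loop iteration of A: write v3_125[v7_328] into slot v6_350, bump v6_350, pop a pair
-- (scoring v5_381) when the top two slots hold the two pattern characters.
-- p0/p1 are the (pure) one-character strings v4_859[0] / v4_859[1], hoisted as parameters.
def pvAStep (p0 p1 : String) (s : Int) (acc : List String × Int × Int) (v7_328 : Int) :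
    List String × Int × Int :=
  let lst := PySem.List.pySetD acc.1 acc.2.1 (PySem.List.pyGetD acc.1 v7_328 "")
  let v6 := acc.2.1 + 1
  if v6 > 1 ∧ PySem.List.pyGetD lst (v6 - 2) "" = p0 ∧ PySem.List.pyGetD lst (v6 - 1) "" = p1
  then (lst, v6 - 2, acc.2.2 + s)
  else (lst, v6, acc.2.2)

-- the final `del v3_125[v6_350:]` only mutates the argument; the return value is v1_754.
def v2_214 (v3_125 : List String) (v4_859 : String) (v5_381 : Int) : Int :=
  ((PySem.List.pyRange 0 (PySem.List.len v3_125) 1).foldl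
    (pvAStep (String.singleton ((PySem.Str.pyGet? v4_859 0).getD ' '))
             (String.singleton ((PySem.Str.pyGet? v4_859 1).getD ' '))
             v5_381)
    (v3_125, 0, 0)).2.2

-- ===== PORT B =====
-- one sweep pass of Source B's inner while-loop over the current list: returns (out, score added, changed)
def pvSweep (p0 p1 : String) (s : Int) : List String → List String × Int × Bool
  | [] => ([], 0, false)
  | [x] => ([x], 0, false)
  | x :: y :: r =>
      if x = p0 ∧ y = p1 then
        let t := pvSweep p0 p1 s r
        (t.1, t.2.1 + s, true)
      else
        let t := pvSweep p0 p1 s (y :: r)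
        (x :: t.1, t.2.1, t.2.2)

theorem pvSweep_len_le (p0 p1 : String) (s : Int) :
    ∀ l : List String, (pvSweep p0 p1 s l).1.length ≤ l.length := by
  intro l
  induction l using pvSweep.induct p0 p1 s with
  | case1 => simp [pvSweep]
  | case2 x => simp [pvSweep]
  | case3 x y r hc ih => simp only [pvSweep, if_pos hc]; simp only [List.length_cons]; omega
  | case4 x y r hc ih =>
      simp only [pvSweep, if_neg hc]
      simp only [List.length_cons] at ih ⊢
      omega

-- a pass that removed something shortens the list (termination of the outer while-loop)
theorem pvSweep_length (p0 p1 : String) (s : Int) :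
    ∀ l : List String, (pvSweep p0 p1 s l).2.2 = true → (pvSweep p0 p1 s l).1.length < l.length := by
  intro l h
  induction l using pvSweep.induct p0 p1 s with
  | case1 => simp [pvSweep] at h
  | case2 x => simp [pvSweep] at h
  | case3 x y r hc ih =>
      have hlen : (pvSweep p0 p1 s r).1.length ≤ r.length := pvSweep_len_le p0 p1 s r
      simp only [pvSweep, if_pos hc]
      simp only [List.length_cons]
      omega
  | case4 x y r hc ih =>
      simp only [pvSweep, if_neg hc] at h ⊢
      have := ih h
      simp only [List.length_cons] at this ⊢
      omega

-- Source B's outer `while changed` loop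
def pvBLoop (p0 p1 : String) (s : Int) (l : List String) (total : Int) : Int :=
  let t := pvSweep p0 p1 s l
  if h : t.2.2 then pvBLoop p0 p1 s t.1 (total + t.2.1) else total
termination_by l.length
decreasing_by exact pvSweep_length p0 p1 s l h

def v2_214_alt (v3_125 : List String) (v4_859 : String) (v5_381 : Int) : Int :=
  pvBLoop (String.singleton ((PySem.Str.pyGet? v4_859 0).getD ' '))
          (String.singleton ((PySem.Str.pyGet? v4_859 1).getD ' '))
          v5_381 v3_125 0

-- ===== PRECONDITION & SPEC =====
-- Pre_ requires the pattern to hold at least two characters: B reads v4_859[0] and v4_859[1]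
-- up front and raises IndexError on shorter patterns, while A raises IndexError on them only
-- when its pop-condition is evaluated (two stacked elements with the first matching).
def Pre_v2_214 (v3_125 : List String) (v4_859 : String) (v5_381 : Int) : Prop :=
  2 ≤ PySem.Str.len v4_859
instance (v3_125 : List String) (v4_859 : String) (v5_381 : Int) : Decidable (Pre_v2_214 v3_125 v4_859 v5_381) := by unfold Pre_v2_214; infer_instance

def pvWitness_v2_214 : List String × String × Int := (["a", "b", "a", "a", "b", "b"], "ab", 3)

def Spec_v2_214 (v3_125 : List String) (v4_859 : String) (v5_381 : Int) (out : Int) : Prop := out = v2_214_alt v3_125 v4_859 v5_381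
instance (v3_125 : List String) (v4_859 : String) (v5_381 : Int) (out : Int) : Decidable (Spec_v2_214 v3_125 v4_859 v5_381 out) := by unfold Spec_v2_214; infer_instance

-- ===== CLAIM (what is proved, stated in full; the proofs are below) =====
def Claim_equal_v2_214 : Prop := ∀ (v3_125 : List String) (v4_859 : String) (v5_381 : Int), Dom_v2_214 v3_125 v4_859 v5_381 → Pre_v2_214 v3_125 v4_859 v5_381 → Spec_v2_214 v3_125 v4_859 v5_381 (v2_214 v3_125 v4_859 v5_381)

-- ===== LEMMAS AND PROOFS =====

-- reference model: the plain stack automaton (stack held top-first, score accumulated)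
def pvStep (p0 p1 : String) (s : Int) : List String × Int → String → List String × Int
  | (t :: r, sc), x => if t = p0 ∧ x = p1 then (r, sc + s) else (x :: t :: r, sc)
  | ([], sc), x => ([x], sc)

-- the stack never holds an adjacent removable pair (top-first: entry above p0 is not p1)
def pvRed (p0 p1 : String) : List String → Prop
  | a :: b :: r => ¬(b = p0 ∧ a = p1) ∧ pvRed p0 p1 (b :: r)
  | _ => True

theorem pvStep_score (p0 p1 : String) (s : Int) (st : List String) (sc d : Int) (x : String) :
    pvStep p0 p1 s (st, sc + d) x = ((pvStep p0 p1 s (st, sc) x).1, (pvStep p0 p1 s (st, sc) x).2 + d) := by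
  cases st with
  | nil => simp [pvStep]
  | cons t r =>
      by_cases h : t = p0 ∧ x = p1 <;> simp [pvStep, h] <;> ring

theorem pvF_score (p0 p1 : String) (s : Int) :
    ∀ (l : List String) (st : List String) (sc d : Int),
      List.foldl (pvStep p0 p1 s) (st, sc + d) l
        = ((List.foldl (pvStep p0 p1 s) (st, sc) l).1, (List.foldl (pvStep p0 p1 s) (st, sc) l).2 + d) := by
  intro l
  induction l with
  | nil => intro st sc d; simp
  | cons x r ih =>
      intro st sc d
      simp only [List.foldl_cons]
      rw [pvStep_score]
      rcases hs : pvStep p0 p1 s (st, sc) x with ⟨st1, sc1⟩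
      exact ih st1 sc1 d

theorem pvStep_red (p0 p1 : String) (s : Int) (st : List String) (sc : Int) (x : String)
    (h : pvRed p0 p1 st) : pvRed p0 p1 (pvStep p0 p1 s (st, sc) x).1 := by
  cases st with
  | nil => simpa [pvStep] using h
  | cons t r =>
      by_cases hc : t = p0 ∧ x = p1
      · simp only [pvStep, hc]
        cases r with
        | nil => trivial
        | cons a w => exact h.2
      · simp only [pvStep, hc, if_neg, not_false_iff]
        exact ⟨hc, h⟩

-- processing a redex from a reduced stack returns to the same stack and scores once
theorem pvStep_redex (p0 p1 : String) (s : Int) (st : List String) (sc : Int)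
    (h : pvRed p0 p1 st) :
    pvStep p0 p1 s (pvStep p0 p1 s (st, sc) p0) p1 = (st, sc + s) := by
  cases st with
  | nil =>
      simp [pvStep]
  | cons t r =>
      by_cases hc : t = p0 ∧ p0 = p1
      · -- pushing p0 pops the top; pushing p1 restores it
        have ht1 : t = p1 := hc.1.trans hc.2
        have step1 : pvStep p0 p1 s (t :: r, sc) p0 = (r, sc + s) := by
          simp [pvStep, hc.1, hc.2]
        rw [step1]
        cases r with
        | nil => simp [pvStep, ht1]
        | cons u w =>
            have hu2 : u ≠ p0 := fun h1 => h.1 ⟨h1, ht1⟩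
            simp only [pvStep]
            rw [if_neg (by simp [hu2]), ht1]
      · simp [pvStep, hc]

-- one sweep pass is absorbed by the stack automaton
theorem pvSweep_F (p0 p1 : String) (s : Int) :
    ∀ (l : List String) (st : List String) (sc : Int), pvRed p0 p1 st →
      List.foldl (pvStep p0 p1 s) (st, sc) l
        = List.foldl (pvStep p0 p1 s) (st, sc + (pvSweep p0 p1 s l).2.1) (pvSweep p0 p1 s l).1 := by
  intro l
  induction l using pvSweep.induct p0 p1 s with
  | case1 => intro st sc h; simp [pvSweep]
  | case2 x => intro st sc h; simp [pvSweep]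
  | case3 x y r hc ih =>
      intro st sc h
      simp only [pvSweep, if_pos hc]
      rw [List.foldl_cons, List.foldl_cons]
      have e1 : pvStep p0 p1 s (pvStep p0 p1 s (st, sc) x) y = (st, sc + s) := by
        rw [hc.1, hc.2]
        exact pvStep_redex p0 p1 s st sc h
      rw [e1, ih st (sc + s) h]
      have e2 : sc + s + (pvSweep p0 p1 s r).2.1 = sc + ((pvSweep p0 p1 s r).2.1 + s) := by ring
      rw [e2]
  | case4 x y r hc ih =>
      intro st sc h
      simp only [pvSweep, if_neg hc]
      rcases hs : pvStep p0 p1 s (st, sc) x with ⟨st1, sc1⟩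
      have hred : pvRed p0 p1 st1 := by
        have := pvStep_red p0 p1 s st sc x h
        rw [hs] at this
        exact this
      have hshift := pvStep_score p0 p1 s st sc ((pvSweep p0 p1 s (y :: r)).2.1) x
      rw [hs] at hshift
      calc List.foldl (pvStep p0 p1 s) (st, sc) (x :: y :: r)
          = List.foldl (pvStep p0 p1 s) (st1, sc1) (y :: r) := by rw [List.foldl_cons, hs]
        _ = List.foldl (pvStep p0 p1 s) (st1, sc1 + (pvSweep p0 p1 s (y :: r)).2.1)
              (pvSweep p0 p1 s (y :: r)).1 := ih st1 sc1 hred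
        _ = List.foldl (pvStep p0 p1 s) (st, sc + (pvSweep p0 p1 s (y :: r)).2.1)
              (x :: (pvSweep p0 p1 s (y :: r)).1) := by rw [List.foldl_cons, hshift]

def pvCompat (p0 p1 : String) (st l : List String) : Prop :=
  ∀ t r x w, st = t :: r → l = x :: w → ¬(t = p0 ∧ x = p1)

-- on a pair-free list the automaton never pops, so the score is unchanged
theorem pvNoPop (p0 p1 : String) (s : Int) :
    ∀ (l : List String) (st : List String) (sc : Int),
      (pvSweep p0 p1 s l).2.2 = false → pvCompat p0 p1 st l →
      (List.foldl (pvStep p0 p1 s) (st, sc) l).2 = sc := by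
  intro l
  induction l using pvSweep.induct p0 p1 s with
  | case1 => intro st sc hf hcmp; simp
  | case2 x =>
      intro st sc hf hcmp
      cases st with
      | nil => simp [pvStep]
      | cons t r =>
          have hnp : ¬(t = p0 ∧ x = p1) := hcmp t r x [] rfl rfl
          simp [pvStep, hnp]
  | case3 x y r hc ih =>
      intro st sc hf hcmp
      simp [pvSweep, if_pos hc] at hf
  | case4 x y r hc ih =>
      intro st sc hf hcmp
      have hf' : (pvSweep p0 p1 s (y :: r)).2.2 = false := by
        simpa [pvSweep, if_neg hc] using hf
      rw [List.foldl_cons]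
      cases st with
      | nil =>
          have hstep : pvStep p0 p1 s ([], sc) x = ([x], sc) := by simp [pvStep]
          rw [hstep]
          exact ih ([x]) sc hf' (by rintro t' r' x' w' ht hl; cases ht; cases hl; exact hc)
      | cons t r2 =>
          have hnp : ¬(t = p0 ∧ x = p1) := hcmp t r2 x (y :: r) rfl rfl
          have hstep : pvStep p0 p1 s (t :: r2, sc) x = (x :: t :: r2, sc) := by
            simp [pvStep, hnp]
          rw [hstep]
          exact ih (x :: t :: r2) sc hf' (by rintro t' r' x' w' ht hl; cases ht; cases hl; exact hc)

theorem pvBLoop_F (p0 p1 : String) (s : Int) :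
    ∀ (l : List String) (total : Int),
      pvBLoop p0 p1 s l total = total + (List.foldl (pvStep p0 p1 s) ([], 0) l).2 := by
  intro l total
  induction l, total using pvBLoop.induct p0 p1 s with
  | case1 l total t h ih =>
      simp only [t] at h ih
      rw [pvBLoop, dif_pos h, ih]
      have hstep := pvSweep_F p0 p1 s l [] 0 (by trivial)
      rw [zero_add] at hstep
      rw [hstep]
      have hF := pvF_score p0 p1 s (pvSweep p0 p1 s l).1 [] 0 (pvSweep p0 p1 s l).2.1
      rw [zero_add] at hF
      rw [hF]
      ring
  | case2 l total t h =>
      simp only [t] at h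
      rw [pvBLoop, dif_neg h]
      have h0 : (List.foldl (pvStep p0 p1 s) ([], 0) l).2 = 0 := by
        apply pvNoPop p0 p1 s l [] 0 (by simpa using h)
        rintro t' r' x' w' ht' hl
        cases ht'
      rw [h0, add_zero]

-- A's array simulation: slots [0, v6_350) hold the stack (bottom first), slots from the
-- read position on are untouched
theorem pvA_inv (p0 p1 : String) (s : Int) :
    ∀ (rest pre st lst : List String) (sc : Int),
      lst.length = pre.length + rest.length →
      st.length ≤ pre.length →
      lst.take st.length = st.reverse →
      lst.drop pre.length = rest →
      ((PySem.List.pyRange (pre.length : Int) ((pre.length : Int) + (rest.length : Int)) 1).foldl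
          (pvAStep p0 p1 s) (lst, (st.length : Int), sc)).2.2
        = (List.foldl (pvStep p0 p1 s) (st, sc) rest).2 := by
  intro rest
  induction rest with
  | nil =>
      intro pre st lst sc hlen hk htake hdrop
      simp [pysem]
  | cons x r ih =>
      intro pre st lst sc hlen hk htake hdrop
      have hilt : pre.length < lst.length := by
        rw [hlen]; simp only [List.length_cons]; omega
      have hklt : st.length < lst.length := lt_of_le_of_lt hk hilt
      have h1 : lst[pre.length]? = some x := by
        have h0 : (lst.drop pre.length)[0]? = lst[pre.length + 0]? := List.getElem?_drop
        rw [hdrop] at h0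
        simpa using h0.symm
      have hlt : (pre.length : Int) < (pre.length : Int) + ((x :: r).length : Int) := by
        push_cast [List.length_cons]; omega
      rw [PySem.List.pyRange_one_cons hlt, List.foldl_cons]
      have hgetD : PySem.List.pyGetD lst (pre.length : Int) "" = x := by
        rw [PySem.List.pyGetD_natCast]
        simp [List.getD, h1]
      have hset : PySem.List.pySetD lst (st.length : Int) x = lst.set st.length x := by
        simp
      have hL1k : (lst.set st.length x)[st.length]? = some x := by
        simp [List.getElem?_set, hklt]
      have htake1 : (lst.set st.length x).take (st.length + 1) = st.reverse ++ [x] := by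
        rw [List.take_add_one, List.take_set_of_le (le_refl _), htake, hL1k]
        rfl
      have hdrop1 : (lst.set st.length x).drop (pre.length + 1) = r := by
        rw [List.drop_set_of_lt (by omega : st.length < pre.length + 1)]
        rw [← List.tail_drop, hdrop]
        rfl
      cases st with
      | nil =>
          have hstep : pvAStep p0 p1 s (lst, ((([] : List String).length : Nat) : Int), sc)
              (pre.length : Int)
              = (lst.set ([] : List String).length x, ((([] : List String).length : Nat) : Int) + 1, sc) := by
            simp only [pvAStep, hgetD, hset]
            rw [if_neg]
            rintro ⟨hgt, -, -⟩
            simp at hgt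
          rw [hstep]
          have hstep2 : List.foldl (pvStep p0 p1 s) (([] : List String), sc) (x :: r)
              = List.foldl (pvStep p0 p1 s) ([x], sc) r := by
            rw [List.foldl_cons]; rfl
          rw [hstep2]
          have hthis := ih (pre ++ [x]) [x] (lst.set 0 x) sc
            (by simp only [List.length_set, List.length_append, List.length_singleton]
                simp only [List.length_cons] at hlen ⊢; omega)
            (by simp)
            (by simpa using htake1)
            (by simpa using hdrop1)
          simp only [List.length_append, List.length_singleton, List.length_nil, List.length_cons,
            Nat.cast_add, Nat.cast_one, Nat.cast_zero, Nat.cast_ofNat] at hthis ⊢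
          ring_nf at hthis ⊢
          exact hthis
      | cons t rr =>
          have eA : ((t :: rr).length : Int) + 1 - 2 = ((rr.length : Nat) : Int) := by
            push_cast [List.length_cons]; ring
          have eB : ((t :: rr).length : Int) + 1 - 1 = (((t :: rr).length : Nat) : Int) := by ring
          have hget2 : PySem.List.pyGetD (lst.set (t :: rr).length x) ((rr.length : Nat) : Int) "" = t := by
            rw [PySem.List.pyGetD_natCast]
            have htk : ((lst.set (t :: rr).length x).take ((t :: rr).length + 1))[rr.length]?
                = (lst.set (t :: rr).length x)[rr.length]? := by
              rw [List.getElem?_take]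
              simp only [List.length_cons]
              rw [if_pos (by omega)]
            rw [htake1] at htk
            have hrev : (t :: rr).reverse ++ [x] = rr.reverse ++ ([t] ++ [x]) := by simp
            rw [hrev] at htk
            have hconc : (rr.reverse ++ ([t] ++ [x]))[rr.length]? = some t := by
              rw [List.getElem?_append_right (by simp)]
              simp
            rw [hconc] at htk
            rw [List.getD_eq_getElem?_getD, ← htk]
            rfl
          have hget3 : PySem.List.pyGetD (lst.set (t :: rr).length x) (((t :: rr).length : Nat) : Int) "" = x := by
            rw [PySem.List.pyGetD_natCast]
            rw [List.getD_eq_getElem?_getD, hL1k]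
            rfl
          by_cases hcond : t = p0 ∧ x = p1
          · have hstep : pvAStep p0 p1 s (lst, (((t :: rr).length : Nat) : Int), sc)
                (pre.length : Int)
                = (lst.set (t :: rr).length x, ((rr.length : Nat) : Int), sc + s) := by
              simp only [pvAStep, hgetD, hset]
              rw [eA, eB, hget2, hget3]
              rw [if_pos ⟨by push_cast [List.length_cons]; omega, hcond.1, hcond.2⟩]
            rw [hstep]
            have hstep2 : List.foldl (pvStep p0 p1 s) (t :: rr, sc) (x :: r)
                = List.foldl (pvStep p0 p1 s) (rr, sc + s) r := by
              rw [List.foldl_cons]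
              simp [pvStep, hcond.1, hcond.2]
            rw [hstep2]
            have htk2 : (lst.set (t :: rr).length x).take rr.length = rr.reverse := by
              rw [List.take_set_of_le (by simp : rr.length ≤ (t :: rr).length)]
              have hq : lst.take rr.length = (lst.take (t :: rr).length).take rr.length := by
                rw [List.take_take]
                congr 1
                simp only [List.length_cons]
                omega
              rw [hq, htake]
              have hrev : (t :: rr).reverse = rr.reverse ++ [t] := by simp
              rw [hrev, List.take_append_of_le_length (by simp)]
              simp
            have hthis := ih (pre ++ [x]) rr (lst.set (t :: rr).length x) (sc + s)
              (by simp only [List.length_set, List.length_append, List.length_singleton]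
                  simp only [List.length_cons] at hlen; omega)
              (by simp only [List.length_append, List.length_singleton]
                  simp only [List.length_cons] at hk; omega)
              htk2
              (by simpa using hdrop1)
            simp only [List.length_append, List.length_singleton, List.length_cons,
              Nat.cast_add, Nat.cast_one] at hthis ⊢
            ring_nf at hthis ⊢
            exact hthis
          · have hstep : pvAStep p0 p1 s (lst, (((t :: rr).length : Nat) : Int), sc)
                (pre.length : Int)
                = (lst.set (t :: rr).length x, ((t :: rr).length : Int) + 1, sc) := by
              simp only [pvAStep, hgetD, hset]
              rw [eA, eB, hget2, hget3]
              rw [if_neg]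
              rintro ⟨-, hA, hB⟩
              exact hcond ⟨hA, hB⟩
            rw [hstep]
            have hstep2 : List.foldl (pvStep p0 p1 s) (t :: rr, sc) (x :: r)
                = List.foldl (pvStep p0 p1 s) (x :: t :: rr, sc) r := by
              rw [List.foldl_cons]
              simp only [pvStep]
              rw [if_neg hcond]
            rw [hstep2]
            have hthis := ih (pre ++ [x]) (x :: t :: rr) (lst.set (t :: rr).length x) sc
              (by simp only [List.length_set, List.length_append, List.length_singleton]
                  simp only [List.length_cons] at hlen ⊢; omega)
              (by simp only [List.length_append, List.length_singleton]
                  simp only [List.length_cons] at hk ⊢; omega)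
              (by simpa using htake1)
              (by simpa using hdrop1)
            simp only [List.length_append, List.length_singleton, List.length_cons,
              Nat.cast_add, Nat.cast_one] at hthis ⊢
            ring_nf at hthis ⊢
            exact hthis

-- ===== VERDICT (by name: the statement is the Claim_ definition above) =====
theorem v2_214_spec : Claim_equal_v2_214 := by
  intro v3_125 v4_859 v5_381 hdom hpre
  unfold Spec_v2_214
  show v2_214 v3_125 v4_859 v5_381 = v2_214_alt v3_125 v4_859 v5_381
  unfold v2_214 v2_214_alt
  have hA := pvA_inv (String.singleton ((PySem.Str.pyGet? v4_859 0).getD ' '))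
    (String.singleton ((PySem.Str.pyGet? v4_859 1).getD ' ')) v5_381
    v3_125 [] [] v3_125 0 (by simp) (by simp) (by simp) (by simp)
  have hB := pvBLoop_F (String.singleton ((PySem.Str.pyGet? v4_859 0).getD ' '))
    (String.singleton ((PySem.Str.pyGet? v4_859 1).getD ' ')) v5_381 v3_125 0
  simp only [List.length_nil, Nat.cast_zero, zero_add] at hA
  simp only [PySem.List.len_eq]
  rw [hA, hB, zero_add]
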